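-- pv_equiv track=rewrite | github.com/MrBrantCode/unitest_baseline | mut_generate/mist_train_cf/cf_87681/solution.py | find_max_prime
-- ===== SOURCE A (Python) =====
-- import math
--
-- def is_prime(n):
--     if n < 2:
--         return False
--     for i in range(2, int(math.sqrt(n)) + 1):
--         if n % i == 0:
--             return False
--     return True
--
-- def find_max_prime(numbers):
--     seen = set()
--     primes = []
--     for num in numbers:
--         if is_prime(num) and num not in seen:
--             seen.add(num)
--             primes.append(num)
--     if not primes:
--         return "Error: No prime numbers found in the array."
--     max_prime = max(primes)
--     max_index = primes.index(max_prime)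
--     return f"The maximum prime number is {max_prime} at index {max_index}."
-- ===== SOURCE B (Python) =====
-- import math
--
-- def is_prime(n):
--     if n < 2:
--         return False
--     for i in range(2, int(math.sqrt(n)) + 1):
--         if n % i == 0:
--             return False
--     return True
--
-- def find_max_prime(numbers):
--     # single pass: track seen primes, distinct-prime counter, and running max/index
--     seen = set()
--     count = 0
--     best = None  # (max_prime, index among distinct primes)
--     for num in numbers:
--         if is_prime(num) and num not in seen:
--             seen.add(num)
--             if best is None or num > best[0]:
--                 best = (num, count)
--             count += 1
--     if best is None:
--         return "Error: No prime numbers found in the array."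
--     return f"The maximum prime number is {best[0]} at index {best[1]}."
-- ===== Notes on version B (the rewrite author's own statement) =====
-- stated objective: alternative
-- what changed: Replaces A's build-dedup-list then separate max() and .index() passes with one online pass that maintains a seen-set, a distinct-prime counter and the running (max, index) pair, never materialising the list.
import Mathlib
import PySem

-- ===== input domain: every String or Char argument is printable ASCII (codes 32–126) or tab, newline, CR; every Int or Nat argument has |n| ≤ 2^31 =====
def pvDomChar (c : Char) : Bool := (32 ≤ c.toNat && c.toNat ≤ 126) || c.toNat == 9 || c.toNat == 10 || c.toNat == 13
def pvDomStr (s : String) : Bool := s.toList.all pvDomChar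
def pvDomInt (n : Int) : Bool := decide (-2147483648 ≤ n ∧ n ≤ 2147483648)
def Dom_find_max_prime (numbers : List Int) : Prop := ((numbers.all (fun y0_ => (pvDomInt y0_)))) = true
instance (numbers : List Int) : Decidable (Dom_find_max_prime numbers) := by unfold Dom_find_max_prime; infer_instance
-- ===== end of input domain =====

-- B fuses A's three passes (dedup-collect, max(), .index()) into one online pass keeping a
-- seen-set, a distinct-prime counter and the running (max, index) pair; alternative decomposition, same cost.

-- ===== PORT A =====
-- int(math.sqrt n) = Nat.sqrt on this domain (|n| ≤ 2^31, where the float sqrt is exact enough)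
def is_prime (n : Int) : Bool :=
  if n < 2 then false
  else (PySem.List.pyRange 2 ((n.toNat.sqrt : Int) + 1) 1).all (fun i => !(PySem.Int.mod n i == 0))

def find_max_prime (numbers : List Int) : String :=
  let st := numbers.foldl
    (fun (st : PySem.Set Int × List Int) num =>
      if is_prime num && !(PySem.Set.contains st.1 num) then
        (PySem.Set.add st.1 num, st.2 ++ [num])
      else st)
    (PySem.Set.empty, [])
  let primes := st.2
  if primes = [] then "Error: No prime numbers found in the array."
  else
    -- primes ≠ [] here, so the .getD defaults are never used (max/index raise only on empty/missing)
    let max_prime := (PySem.List.max? primes (fun x => x)).getD 0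
    let max_index : Int := (((PySem.List.index? primes max_prime).getD 0 : Nat) : Int)
    "The maximum prime number is " ++ PySem.Int.toStr max_prime ++ " at index " ++
      PySem.Int.toStr max_index ++ "."

-- ===== PORT B =====
def find_max_prime_alt (numbers : List Int) : String :=
  let st := numbers.foldl
    (fun (st : PySem.Set Int × Int × Option (Int × Int)) num =>
      if is_prime num && !(PySem.Set.contains st.1 num) then
        (PySem.Set.add st.1 num, st.2.1 + 1,
          match st.2.2 with
          | none => some (num, st.2.1)
          | some (m, i) => if m < num then some (num, st.2.1) else some (m, i))
      else st)
    (PySem.Set.empty, 0, none)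
  match st.2.2 with
  | none => "Error: No prime numbers found in the array."
  | some (m, i) =>
      "The maximum prime number is " ++ PySem.Int.toStr m ++ " at index " ++
        PySem.Int.toStr i ++ "."

-- ===== PRECONDITION & SPEC =====
def Spec_find_max_prime (numbers : List Int) (out : String) : Prop := out = find_max_prime_alt numbers
instance (numbers : List Int) (out : String) : Decidable (Spec_find_max_prime numbers out) := by unfold Spec_find_max_prime; infer_instance

-- ===== CLAIM (what is proved, stated in full; the proofs are below) =====
def Claim_equal_find_max_prime : Prop := ∀ (numbers : List Int), Dom_find_max_prime numbers → Spec_find_max_prime numbers (find_max_prime numbers)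

-- ===== LEMMAS AND PROOFS =====

-- abstraction: B's best component as a function of A's primes list
def pvBest (primes : List Int) : Option (Int × Int) :=
  (PySem.List.max? primes (fun x => x)).map
    (fun m => (m, (((PySem.List.index? primes m).getD 0 : Nat) : Int)))

theorem pvBest_nil : pvBest [] = none := rfl

theorem pvBest_append (primes : List Int) (num : Int) (hnum : num ∉ primes) :
    pvBest (primes ++ [num]) =
      match pvBest primes with
      | none => some (num, (primes.length : Int))
      | some (m, i) => if m < num then some (num, (primes.length : Int)) else some (m, i) := by
  cases primes with
  | nil =>
      rw [pvBest_nil]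
      simp [pvBest, PySem.List.max?_id_cons]
  | cons p t =>
      have hmax : (PySem.List.max? ((p :: t) ++ [num]) fun y => y)
          = some (max (List.foldl max p t) num) := by
        rw [List.cons_append, PySem.List.max?_id_cons, List.foldl_append]
        simp
      have hM : (PySem.List.max? (p :: t) fun y => y) = some (List.foldl max p t) :=
        PySem.List.max?_id_cons p t
      have hMmem : List.foldl max p t ∈ p :: t := PySem.List.max?_mem hM
      by_cases hlt : List.foldl max p t < num
      · have hm : max (List.foldl max p t) num = num := max_eq_right (le_of_lt hlt)
        have hidx := PySem.List.index?_append_singleton_self (p :: t) num hnum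
        rw [pvBest, pvBest, hmax, hm, hM, Option.map_some, Option.map_some]
        rw [show ((p :: t) ++ [num]) = (p :: t ++ [num]) from rfl] at hidx ⊢
        rw [hidx]
        simp [hlt]
      · have hm : max (List.foldl max p t) num = List.foldl max p t :=
          max_eq_left (le_of_not_gt hlt)
        have hidx := PySem.List.index?_append_of_mem (l := p :: t) [num] hMmem
        rw [pvBest, pvBest, hmax, hm, hM, Option.map_some, Option.map_some]
        rw [show ((p :: t) ++ [num]) = (p :: t ++ [num]) from rfl] at hidx
        rw [hidx]
        simp [hlt]

-- the fused loop invariant: B's fold from the abstraction of A's state equals the abstraction of A's fold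
theorem pv_loop (nums : List Int) : ∀ (seen : PySem.Set Int) (primes : List Int),
    (∀ x ∈ primes, PySem.Set.contains seen x = true) →
    nums.foldl
      (fun (st : PySem.Set Int × Int × Option (Int × Int)) num =>
        if is_prime num && !(PySem.Set.contains st.1 num) then
          (PySem.Set.add st.1 num, st.2.1 + 1,
            match st.2.2 with
            | none => some (num, st.2.1)
            | some (m, i) => if m < num then some (num, st.2.1) else some (m, i))
        else st)
      (seen, (primes.length : Int), pvBest primes)
    = (let stA := nums.foldl
        (fun (st : PySem.Set Int × List Int) num =>
          if is_prime num && !(PySem.Set.contains st.1 num) then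
            (PySem.Set.add st.1 num, st.2 ++ [num])
          else st)
        (seen, primes)
       (stA.1, (stA.2.length : Int), pvBest stA.2)) := by
  induction nums with
  | nil => intro seen primes h; rfl
  | cons num rest ih =>
      intro seen primes h
      by_cases hcp : (is_prime num && !(PySem.Set.contains seen num)) = true
      · have hc : is_prime num = true ∧ PySem.Set.contains seen num = false := by
          constructor
          · revert hcp; cases is_prime num <;> simp
          · revert hcp; cases PySem.Set.contains seen num <;> simp
        have hns := hc.2
        have hnum : num ∉ primes := fun hmem => by
          have := h num hmem; rw [hns] at this; cases this
        have hadd : PySem.Set.add seen num = seen ++ [num] := by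
          have hns' : num ∉ seen := by simpa [PySem.Set.contains] using hns
          simp [PySem.Set.add, hns']
        rw [List.foldl_cons, List.foldl_cons, if_pos hcp, if_pos hcp]
        rw [show ((primes.length : Int) + 1) = (((primes ++ [num]).length : Nat) : Int) by
              simp]
        rw [show (match pvBest primes with
              | none => some (num, (primes.length : Int))
              | some (m, i) => if m < num then some (num, (primes.length : Int)) else some (m, i))
            = pvBest (primes ++ [num]) from (pvBest_append primes num hnum).symm]
        exact ih (PySem.Set.add seen num) (primes ++ [num]) (by
          intro x hx
          rw [hadd]
          rcases List.mem_append.mp hx with hx | hx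
          · have hxs := h x hx
            simp [PySem.Set.contains] at hxs ⊢
            exact Or.inl hxs
          · simp at hx
            subst hx
            simp [PySem.Set.contains])
      · have hc' : (is_prime num && !(PySem.Set.contains seen num)) = false := by
          revert hcp; cases (is_prime num && !(PySem.Set.contains seen num)) <;> simp
        rw [List.foldl_cons, List.foldl_cons, if_neg, if_neg]
        · exact ih seen primes h
        · rw [hc']; simp
        · rw [hc']; simp

-- ===== VERDICT (by name: the statement is the Claim_ definition above) =====
theorem find_max_prime_spec : Claim_equal_find_max_prime := by
  intro numbers _
  unfold Spec_find_max_prime find_max_prime find_max_prime_alt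
  have H := pv_loop numbers PySem.Set.empty []
    (by intro x hx; cases hx)
  simp only [List.length_nil, Nat.cast_zero, pvBest_nil] at H
  rw [H]
  generalize (List.foldl
      (fun (st : PySem.Set Int × List Int) num =>
        if is_prime num && !(PySem.Set.contains st.1 num) then
          (PySem.Set.add st.1 num, st.2 ++ [num])
        else st)
      (PySem.Set.empty, []) numbers) = stA
  cases hp : stA.2 with
  | nil => simp [hp, pvBest_nil]
  | cons p t =>
      have hM := PySem.List.max?_id_cons p t
      simp [hp, pvBest, hM]
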